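-- pv_equiv track=rewrite | github.com/arshthesingh/weather-api | weather_script.py | generate_email_subject
-- ===== SOURCE A (Python) =====
-- def generate_email_subject(severe_conditions, city):
--     if not severe_conditions:
--         return f"Your 24-Hour Weather Forecast for {city}"
--     condition_messages = {
--         'RAIN': "RAIN EXPECTED IN THE NEXT 24 HOURS",
--         'SNOW': "SNOW EXPECTED IN THE NEXT 24 HOURS",
--         'ICE': "ICE CONDITIONS IN THE NEXT 24 HOURS",
--         'HIGH WINDS': "HIGH WINDS EXPECTED IN THE NEXT 24 HOURS",
--         'EXTREMELY COLD': "EXTREMELY COLD TEMPERATURES IN THE NEXT 24 HOURS",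
--         'EXTREMELY HOT': "EXTREMELY HOT TEMPERATURES IN THE NEXT 24 HOURS"
--     }
--     priority = ['SNOW', 'ICE', 'RAIN', 'EXTREMELY HOT', 'EXTREMELY COLD', 'HIGH WINDS']
--     severe_conditions_sorted = sorted(
--         severe_conditions,
--         key=lambda x: priority.index(x) if x in priority else len(priority)
--     )
--     alert_messages = [condition_messages[cond] for cond in severe_conditions_sorted]
--     subject = "; ".join(alert_messages)
--     return subject
-- ===== SOURCE B (Python) =====
-- def generate_email_subject(severe_conditions, city):
--     if not severe_conditions:
--         return f"Your 24-Hour Weather Forecast for {city}"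
--     condition_messages = {
--         'RAIN': "RAIN EXPECTED IN THE NEXT 24 HOURS",
--         'SNOW': "SNOW EXPECTED IN THE NEXT 24 HOURS",
--         'ICE': "ICE CONDITIONS IN THE NEXT 24 HOURS",
--         'HIGH WINDS': "HIGH WINDS EXPECTED IN THE NEXT 24 HOURS",
--         'EXTREMELY COLD': "EXTREMELY COLD TEMPERATURES IN THE NEXT 24 HOURS",
--         'EXTREMELY HOT': "EXTREMELY HOT TEMPERATURES IN THE NEXT 24 HOURS"
--     }
--     priority = ['SNOW', 'ICE', 'RAIN', 'EXTREMELY HOT', 'EXTREMELY COLD', 'HIGH WINDS']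
--     rank = {cond: i for i, cond in enumerate(priority)}
--     buckets = [[] for _ in priority]
--     for cond in severe_conditions:
--         buckets[rank[cond]].append(condition_messages[cond])
--     return "; ".join([msg for bucket in buckets for msg in bucket])
-- ===== Notes on version B (the rewrite author's own statement) =====
-- stated objective: alternative
-- what changed: Replaces the comparison sort with a priority.index key (followed by a message-lookup pass over the sorted list) by a bucket/counting-sort distribution: one pass drops each condition's message into its priority-ranked bucket, then the buckets are flattened in order.
import Mathlib
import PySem

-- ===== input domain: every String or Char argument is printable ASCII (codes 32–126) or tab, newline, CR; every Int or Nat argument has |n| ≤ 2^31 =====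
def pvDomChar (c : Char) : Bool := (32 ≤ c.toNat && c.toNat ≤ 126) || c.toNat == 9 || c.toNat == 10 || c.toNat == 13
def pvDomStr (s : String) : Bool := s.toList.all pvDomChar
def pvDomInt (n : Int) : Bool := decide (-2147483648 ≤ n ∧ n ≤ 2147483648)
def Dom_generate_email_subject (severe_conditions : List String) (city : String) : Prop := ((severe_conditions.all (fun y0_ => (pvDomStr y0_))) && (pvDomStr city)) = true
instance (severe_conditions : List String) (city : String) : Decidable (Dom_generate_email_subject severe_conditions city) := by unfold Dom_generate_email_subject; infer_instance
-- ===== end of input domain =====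

-- B replaces A's comparison sort (key = priority.index) + message-lookup pass over the sorted list
-- by a bucket/counting-sort distribution into priority-ranked buckets, flattened in order ('alternative').
-- Both programs share the same two literal tables:
def pvMsgs : PySem.Dict String String := PySem.Dict.ofList [
  ("RAIN", "RAIN EXPECTED IN THE NEXT 24 HOURS"),
  ("SNOW", "SNOW EXPECTED IN THE NEXT 24 HOURS"),
  ("ICE", "ICE CONDITIONS IN THE NEXT 24 HOURS"),
  ("HIGH WINDS", "HIGH WINDS EXPECTED IN THE NEXT 24 HOURS"),
  ("EXTREMELY COLD", "EXTREMELY COLD TEMPERATURES IN THE NEXT 24 HOURS"),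
  ("EXTREMELY HOT", "EXTREMELY HOT TEMPERATURES IN THE NEXT 24 HOURS")]

def pvPriority : List String := ["SNOW", "ICE", "RAIN", "EXTREMELY HOT", "EXTREMELY COLD", "HIGH WINDS"]

-- ===== PORT A =====
-- A's sort key: priority.index(x) if x in priority else len(priority)
def pvKey (x : String) : Int :=
  if pvPriority.contains x then ((PySem.List.index? pvPriority x).getD 0 : Int)
  else (pvPriority.length : Int)

def generate_email_subject (severe_conditions : List String) (city : String) : String :=
  if severe_conditions = [] then "Your 24-Hour Weather Forecast for " ++ city
  else
    let severe_conditions_sorted := PySem.List.sorted severe_conditions pvKey false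
    -- condition_messages[cond] raises KeyError for a cond outside the table; Pre_ excludes
    -- those inputs, so the total form getD "" is exact on Pre_
    let alert_messages := severe_conditions_sorted.map (fun cond => pvMsgs.getD cond "")
    PySem.Str.join "; " alert_messages

-- ===== PORT B =====
-- B-side helpers: rank = {cond: i for i, cond in enumerate(priority)}, and the loop body
-- buckets[rank[cond]].append(condition_messages[cond]) (read-modify-write of the bucket list;
-- rank[cond] raises KeyError on unknown cond — Pre_ excludes those, so the total forms are exact)
def pvRank : PySem.Dict String Int :=
  (PySem.List.enumerate pvPriority).foldl (fun d p => d.insert p.2 p.1) PySem.Dict.empty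

def pvStep (bs : List (List String)) (cond : String) : List (List String) :=
  PySem.List.pySetD bs (pvRank.getD cond 0)
    ((PySem.List.pyGet? bs (pvRank.getD cond 0)).getD [] ++ [pvMsgs.getD cond ""])

def generate_email_subject_alt (severe_conditions : List String) (city : String) : String :=
  if severe_conditions = [] then "Your 24-Hour Weather Forecast for " ++ city
  else
    let buckets := List.replicate pvPriority.length ([] : List String)
    let buckets := severe_conditions.foldl pvStep buckets
    PySem.Str.join "; " buckets.flatten

-- ===== PRECONDITION & SPEC =====
-- Pre_ excludes exactly the inputs on which A raises KeyError: a non-empty list containing a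
-- condition outside the six known ones (A returns on every other input).
def Pre_generate_email_subject (severe_conditions : List String) (city : String) : Prop :=
  ∀ x ∈ severe_conditions, x ∈ pvPriority
instance (severe_conditions : List String) (city : String) : Decidable (Pre_generate_email_subject severe_conditions city) := by unfold Pre_generate_email_subject; infer_instance

def pvWitness_generate_email_subject : List String × String := (["RAIN", "SNOW", "RAIN"], "Oslo")

def Spec_generate_email_subject (severe_conditions : List String) (city : String) (out : String) : Prop := out = generate_email_subject_alt severe_conditions city
instance (severe_conditions : List String) (city : String) (out : String) : Decidable (Spec_generate_email_subject severe_conditions city out) := by unfold Spec_generate_email_subject; infer_instance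

-- ===== CLAIM (what is proved, stated in full; the proofs are below) =====
def Claim_equal_generate_email_subject : Prop := ∀ (severe_conditions : List String) (city : String), Dom_generate_email_subject severe_conditions city → Pre_generate_email_subject severe_conditions city → Spec_generate_email_subject severe_conditions city (generate_email_subject severe_conditions city)

-- ===== LEMMAS AND PROOFS =====

-- the canonical order A's stable sort produces on Pre_: each condition block, in priority order
def pvYs (sc : List String) : List String :=
  pvPriority.flatMap (fun c => List.replicate (sc.count c) c)

lemma pvKey_inj_on : ∀ a ∈ pvPriority, ∀ b ∈ pvPriority, pvKey a = pvKey b → a = b := by decide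

lemma mem_pvYs {x : String} {sc : List String} (h : x ∈ pvYs sc) : x ∈ pvPriority := by
  simp only [pvYs, List.mem_flatMap] at h
  obtain ⟨c, hc, hx⟩ := h
  rwa [List.eq_of_mem_replicate hx]

lemma count_flatMap_replicate_of_not_mem (pl : List String) (sc : List String) (a : String)
    (ha : a ∉ pl) : (pl.flatMap (fun c => List.replicate (sc.count c) c)).count a = 0 := by
  induction pl with
  | nil => simp
  | cons c pl ih =>
    simp only [List.mem_cons, not_or] at ha
    simp only [List.flatMap_cons, List.count_append, List.count_replicate, ih ha.2]
    rw [if_neg (by simpa using Ne.symm ha.1)]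

lemma count_flatMap_replicate_of_mem (pl : List String) (sc : List String) (a : String)
    (hnd : pl.Nodup) (ha : a ∈ pl) :
    (pl.flatMap (fun c => List.replicate (sc.count c) c)).count a = sc.count a := by
  induction pl with
  | nil => simp at ha
  | cons c pl ih =>
    simp only [List.flatMap_cons, List.count_append, List.count_replicate]
    by_cases hac : a = c
    · subst hac
      rw [if_pos (by simp), count_flatMap_replicate_of_not_mem pl sc a (List.nodup_cons.mp hnd).1]
      omega
    · have ha' : a ∈ pl := by
        rcases List.mem_cons.mp ha with h | h
        · exact absurd h hac
        · exact h
      rw [if_neg (by simpa using Ne.symm hac), ih (List.nodup_cons.mp hnd).2 ha']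
      omega

lemma count_pvYs (sc : List String) (a : String) :
    (pvYs sc).count a = if a ∈ pvPriority then sc.count a else 0 := by
  by_cases ha : a ∈ pvPriority
  · rw [if_pos ha]
    exact count_flatMap_replicate_of_mem pvPriority sc a (by decide) ha
  · rw [if_neg ha]
    exact count_flatMap_replicate_of_not_mem pvPriority sc a ha

lemma perm_pvYs {sc : List String} (h : ∀ x ∈ sc, x ∈ pvPriority) : sc.Perm (pvYs sc) := by
  rw [List.perm_iff_count]
  intro a
  rw [count_pvYs]
  by_cases ha : a ∈ pvPriority
  · rw [if_pos ha]
  · rw [if_neg ha, List.count_eq_zero]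
    intro hmem
    exact ha (h a hmem)

lemma pairwise_flatMap_replicate (key : String → Int) (pl : List String) (sc : List String)
    (h : pl.Pairwise (fun a b => key a ≤ key b)) :
    (pl.flatMap (fun c => List.replicate (sc.count c) c)).Pairwise (fun a b => key a ≤ key b) := by
  induction pl with
  | nil => simp
  | cons c pl ih =>
    simp only [List.flatMap_cons]
    rw [List.pairwise_append]
    refine ⟨List.pairwise_replicate.mpr (Or.inr le_rfl), ih (List.pairwise_cons.mp h).2, ?_⟩
    intro a ha b hb
    rw [List.eq_of_mem_replicate ha]
    simp only [List.mem_flatMap] at hb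
    obtain ⟨c', hc', hb'⟩ := hb
    rw [List.eq_of_mem_replicate hb']
    exact (List.pairwise_cons.mp h).1 c' hc'

lemma pairwise_pvYs (sc : List String) :
    (pvYs sc).Pairwise (fun a b => pvKey a ≤ pvKey b) := by
  exact pairwise_flatMap_replicate pvKey pvPriority sc (by decide)

lemma sorted_eq_pvYs {sc : List String} (h : ∀ x ∈ sc, x ∈ pvPriority) :
    PySem.List.sorted sc pvKey false = pvYs sc := by
  apply List.Perm.eq_of_pairwise
  · intro a b ha hb hab hba
    have ha' : a ∈ pvPriority := h a ((PySem.List.mem_sorted _ _ _ _).mp ha)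
    have hb' : b ∈ pvPriority := mem_pvYs hb
    exact pvKey_inj_on a ha' b hb' (le_antisymm hab hba)
  · exact PySem.List.sorted_pairwise sc pvKey
  · exact pairwise_pvYs sc
  · exact (PySem.List.sorted_perm sc pvKey false).trans (perm_pvYs h)

lemma foldl_pvStep (sc : List String) (h : ∀ x ∈ sc, x ∈ pvPriority) :
    ∀ b0 b1 b2 b3 b4 b5 : List String,
    sc.foldl pvStep [b0, b1, b2, b3, b4, b5] =
      [b0 ++ List.replicate (sc.count "SNOW") (pvMsgs.getD "SNOW" ""),
       b1 ++ List.replicate (sc.count "ICE") (pvMsgs.getD "ICE" ""),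
       b2 ++ List.replicate (sc.count "RAIN") (pvMsgs.getD "RAIN" ""),
       b3 ++ List.replicate (sc.count "EXTREMELY HOT") (pvMsgs.getD "EXTREMELY HOT" ""),
       b4 ++ List.replicate (sc.count "EXTREMELY COLD") (pvMsgs.getD "EXTREMELY COLD" ""),
       b5 ++ List.replicate (sc.count "HIGH WINDS") (pvMsgs.getD "HIGH WINDS" "")] := by
  induction sc with
  | nil => intro b0 b1 b2 b3 b4 b5; simp
  | cons cond sc ih =>
    have hsc : ∀ x ∈ sc, x ∈ pvPriority := fun x hx => h x (List.mem_cons_of_mem _ hx)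
    have hc : cond ∈ pvPriority := h cond List.mem_cons_self
    intro b0 b1 b2 b3 b4 b5
    rw [List.foldl_cons]
    simp only [pvPriority, List.mem_cons, List.not_mem_nil, or_false] at hc
    rcases hc with rfl | rfl | rfl | rfl | rfl | rfl
    · rw [show pvStep [b0, b1, b2, b3, b4, b5] "SNOW" = [b0 ++ [pvMsgs.getD "SNOW" ""], b1, b2, b3, b4, b5] from by
          simp [pvStep, PySem.List.pySetD, PySem.List.pySet?, PySem.List.pyIdx?,
            PySem.List.pyGet?, show pvRank.getD "SNOW" 0 = 0 from by decide],
        ih hsc]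
      simp [List.replicate_succ, List.append_assoc]
    · rw [show pvStep [b0, b1, b2, b3, b4, b5] "ICE" = [b0, b1 ++ [pvMsgs.getD "ICE" ""], b2, b3, b4, b5] from by
          simp [pvStep, PySem.List.pySetD, PySem.List.pySet?, PySem.List.pyIdx?,
            PySem.List.pyGet?, show pvRank.getD "ICE" 0 = 1 from by decide],
        ih hsc]
      simp [List.replicate_succ, List.append_assoc]
    · rw [show pvStep [b0, b1, b2, b3, b4, b5] "RAIN" = [b0, b1, b2 ++ [pvMsgs.getD "RAIN" ""], b3, b4, b5] from by
          simp [pvStep, PySem.List.pySetD, PySem.List.pySet?, PySem.List.pyIdx?,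
            PySem.List.pyGet?, show pvRank.getD "RAIN" 0 = 2 from by decide],
        ih hsc]
      simp [List.replicate_succ, List.append_assoc]
    · rw [show pvStep [b0, b1, b2, b3, b4, b5] "EXTREMELY HOT" = [b0, b1, b2, b3 ++ [pvMsgs.getD "EXTREMELY HOT" ""], b4, b5] from by
          simp [pvStep, PySem.List.pySetD, PySem.List.pySet?, PySem.List.pyIdx?,
            PySem.List.pyGet?, show pvRank.getD "EXTREMELY HOT" 0 = 3 from by decide],
        ih hsc]
      simp [List.replicate_succ, List.append_assoc]
    · rw [show pvStep [b0, b1, b2, b3, b4, b5] "EXTREMELY COLD" = [b0, b1, b2, b3, b4 ++ [pvMsgs.getD "EXTREMELY COLD" ""], b5] from by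
          simp [pvStep, PySem.List.pySetD, PySem.List.pySet?, PySem.List.pyIdx?,
            PySem.List.pyGet?, show pvRank.getD "EXTREMELY COLD" 0 = 4 from by decide],
        ih hsc]
      simp [List.replicate_succ, List.append_assoc]
    · rw [show pvStep [b0, b1, b2, b3, b4, b5] "HIGH WINDS" = [b0, b1, b2, b3, b4, b5 ++ [pvMsgs.getD "HIGH WINDS" ""]] from by
          simp [pvStep, PySem.List.pySetD, PySem.List.pySet?, PySem.List.pyIdx?,
            PySem.List.pyGet?, show pvRank.getD "HIGH WINDS" 0 = 5 from by decide],
        ih hsc]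
      simp [List.replicate_succ, List.append_assoc]

-- ===== VERDICT (by name: the statement is the Claim_ definition above) =====
theorem generate_email_subject_spec : Claim_equal_generate_email_subject := by
  unfold Claim_equal_generate_email_subject Spec_generate_email_subject
  intro sc city _ hpre
  unfold generate_email_subject generate_email_subject_alt
  by_cases hnil : sc = []
  · simp [hnil]
  · simp only [if_neg hnil]
    congr 1
    rw [sorted_eq_pvYs hpre,
      show List.replicate pvPriority.length ([] : List String) = [[], [], [], [], [], []] from rfl,
      foldl_pvStep sc hpre]
    simp [pvYs, pvPriority]
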